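-- pv_equiv track=rewrite | github.com/Capacap/advent_of_code_2024 | day_12/main.py | calc_island_sides
-- ===== SOURCE A (Python) =====
-- from collections import deque
--
-- def bfs(origin: tuple, layout: dict[tuple, int]) -> list[tuple]:
--     explored: set[tuple] = set()
--     frontier: deque[tuple] = deque([origin])
--     while frontier:
--         tile: tuple = frontier.popleft()
--         if tile in explored:
--             continue
--         explored.add(tile)
--         for d in [(1, 0), (0, 1), (-1, 0), (0, -1)]:
--             xy: tuple = (tile[0] + d[0], tile[1] + d[1])
--             if xy in layout and xy not in explored and layout[tile] == layout[xy]: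
--                 frontier.append(xy)
--     return explored
--
-- def find_island_borders(island: set[tuple]) -> set[tuple]:
--     borders: set[tuple] = set()
--     for tile in island:
--         for d in [(1, 0), (0, 1), (-1, 0), (0, -1)]:
--             xy: tuple = (tile[0] + d[0], tile[1] + d[1])
--             if xy not in island:
--                 border_tile = (xy[0], xy[1], d[0], d[1])
--                 borders.add(border_tile)
--     return borders
--
-- def calc_island_sides(island: set[tuple]) -> int:
--     borders: set[tuple] = find_island_borders(island)
--
--     sides = []
--     for d in [(1, 0), (0, 1), (-1, 0), (0, -1)]:
--         tiles = [(tile[0], tile[1]) for tile in borders if tile[2] == d[0] and tile[3] == d[1]]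
--         layout = {tile: 0 for tile in tiles}
--         forbidden = set()
--         for xy in tiles:
--             if xy in forbidden:
--                 continue
--             side = bfs(xy, layout)
--             sides.append(side)
--             forbidden.update(side)
--
--     return len(sides)
-- ===== SOURCE B (Python) =====
-- def calc_island_sides(island: set, ) -> int:
--     # Corner counting: a polyomino's side count equals the number of
--     # border-run endpoints; count one per (cell, direction) edge that
--     # ends its run.
--     total = 0
--     for (x, y) in island:
--         for (dx, dy) in ((1, 0), (0, 1), (-1, 0), (0, -1)):
--             if (x + dx, y + dy) not in island:
--                 px, py = -dy, dx
--                 if (x + px, y + py) not in island or (x + px + dx, y + py + dy) in island: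
--                     total += 1
--     return total
-- ===== Notes on version B (the rewrite author's own statement) =====
-- stated objective: simpler
-- what changed: Replaced the border-set construction plus per-direction BFS component counting with a single pass over the cells that counts border-run endpoints (corner counting), using the identity that a region's side count equals its corner count.
import Mathlib
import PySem

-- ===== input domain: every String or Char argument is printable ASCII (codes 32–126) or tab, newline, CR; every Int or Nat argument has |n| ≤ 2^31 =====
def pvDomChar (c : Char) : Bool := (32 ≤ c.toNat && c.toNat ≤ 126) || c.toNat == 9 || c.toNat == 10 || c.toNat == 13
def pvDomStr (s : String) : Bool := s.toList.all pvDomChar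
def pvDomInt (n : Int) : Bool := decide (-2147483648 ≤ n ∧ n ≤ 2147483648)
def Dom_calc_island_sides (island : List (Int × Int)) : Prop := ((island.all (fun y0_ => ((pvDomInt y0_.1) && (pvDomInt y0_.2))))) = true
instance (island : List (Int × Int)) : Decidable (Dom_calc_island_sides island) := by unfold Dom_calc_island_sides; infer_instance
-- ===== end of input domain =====

-- B replaces A's border-BFS side counting by a one-pass corner (border-run endpoint) count; equivalence is proved on all inputs.
-- The Python set argument is modelled as a List (Int × Int); both ports read it only through membership, so duplicates are harmless.

-- ===== PORT A =====
def pvDirs : List (Int × Int) := [(1, 0), (0, 1), (-1, 0), (0, -1)]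

-- bfs: deque BFS with an explored set; fuel 4*|layout|+1 is proved sufficient below
-- (each popped tile is either already explored, shrinking the frontier, or newly
-- explored, which can happen at most |layout| times, each appending ≤ 4 tiles —
-- the same reason the Python loop terminates).
def pvBfsAux (layout : PySem.Dict (Int × Int) Int) :
    Nat → PySem.Set (Int × Int) → List (Int × Int) → PySem.Set (Int × Int)
  | 0, explored, _ => explored
  | _ + 1, explored, [] => explored
  | fuel + 1, explored, tile :: frontier =>
    if PySem.Set.contains explored tile then
      pvBfsAux layout fuel explored frontier
    else
      let explored' := PySem.Set.add explored tile
      let frontier' := frontier ++ pvDirs.filterMap (fun d =>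
        let xy := (tile.1 + d.1, tile.2 + d.2)
        if layout.contains xy && !(PySem.Set.contains explored' xy)
            && (layout.getD tile 0 == layout.getD xy 0) then some xy else none)
      pvBfsAux layout fuel explored' frontier'

-- layout[tile] is ported as getD tile 0: every tile reaching the lookup is a layout key (origin and
-- every appended xy are), so the Python expression never raises and equals the stored value 0.
def pvBfs (origin : Int × Int) (layout : PySem.Dict (Int × Int) Int) : PySem.Set (Int × Int) :=
  pvBfsAux layout (4 * layout.size + 1) PySem.Set.empty [origin]

def pvFindIslandBorders (island : List (Int × Int)) : PySem.Set (Int × Int × Int × Int) :=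
  island.foldl (fun borders tile =>
    pvDirs.foldl (fun borders d =>
      let xy := (tile.1 + d.1, tile.2 + d.2)
      if xy ∈ island then borders
      else PySem.Set.add borders (xy.1, xy.2, d.1, d.2)) borders) PySem.Set.empty

def calc_island_sides (island : List (Int × Int)) : Int :=
  let borders := pvFindIslandBorders island
  let sides : List (PySem.Set (Int × Int)) := pvDirs.foldl (fun sides d =>
    let tiles : List (Int × Int) := borders.filterMap (fun t =>
      if t.2.2.1 = d.1 ∧ t.2.2.2 = d.2 then some (t.1, t.2.1) else none)
    let layout : PySem.Dict (Int × Int) Int :=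
      tiles.foldl (fun dct t => dct.insert t 0) PySem.Dict.empty
    (tiles.foldl (fun (st : List (PySem.Set (Int × Int)) × PySem.Set (Int × Int)) xy =>
      if xy ∈ st.2 then st
      else (st.1 ++ [pvBfs xy layout], PySem.Set.update st.2 (pvBfs xy layout)))
      (sides, PySem.Set.empty)).1) []
  (sides.length : Int)

-- ===== PORT B =====
def calc_island_sides_alt (island : List (Int × Int)) : Int :=
  (PySem.Set.ofList island).foldl (fun total c =>
    [((1 : Int), (0 : Int)), (0, 1), (-1, 0), (0, -1)].foldl (fun total dd =>
      if (c.1 + dd.1, c.2 + dd.2) ∈ island then total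
      else
        if (c.1 + -dd.2, c.2 + dd.1) ∉ island ∨
            (c.1 + -dd.2 + dd.1, c.2 + dd.1 + dd.2) ∈ island then total + 1
        else total) total) 0

-- ===== PRECONDITION & SPEC =====
def Spec_calc_island_sides (island : List (Int × Int)) (out : Int) : Prop := out = calc_island_sides_alt island
instance (island : List (Int × Int)) (out : Int) : Decidable (Spec_calc_island_sides island out) := by unfold Spec_calc_island_sides; infer_instance

-- ===== CLAIM (what is proved, stated in full; the proofs are below) =====
def Claim_equal_calc_island_sides : Prop := ∀ (island : List (Int × Int)), Dom_calc_island_sides island → Spec_calc_island_sides island (calc_island_sides island)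

-- ===== LEMMAS AND PROOFS =====

-- ---------- proof-layer definitions ----------

def pvShift (c d : Int × Int) : Int × Int := (c.1 + d.1, c.2 + d.2)

def pvCellAt (p c : Int × Int) (j : Int) : Int × Int := (c.1 + j * p.1, c.2 + j * p.2)

-- "y lies on the p-run of c inside K": y = c + k·p and every cell of K strictly between is in K
def pvSame (K : List (Int × Int)) (p c y : Int × Int) : Prop :=
  ∃ k : Int, y = pvCellAt p c k ∧ ∀ j : Int, min 0 k ≤ j → j ≤ max 0 k → pvCellAt p c j ∈ K

-- number of further K-cells above c along p (0 if the run never exits, which cannot happen for p ≠ 0)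
def pvN (K : List (Int × Int)) (p c : Int × Int) : ℕ :=
  if h : ∃ n : ℕ, n < K.length + 1 ∧ pvCellAt p c ((n : Int) + 1) ∉ K then Nat.find h else 0

def pvEnd (K : List (Int × Int)) (p c : Int × Int) : Int × Int := pvCellAt p c (pvN K p c)

def pvM (K E : List (Int × Int)) : ℕ := (K.toFinset \ E.toFinset).card

def pvBpB (island : List (Int × Int)) (d c : Int × Int) : Bool :=
  decide (pvShift c d ∉ island) &&
    (decide (pvShift c (-d.2, d.1) ∉ island) || decide (pvShift (pvShift c (-d.2, d.1)) d ∈ island))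

-- ---------- cell arithmetic ----------

theorem pvCellAt_zero (p c : Int × Int) : pvCellAt p c 0 = c := by simp [pvCellAt]

theorem pvCellAt_add (p c : Int × Int) (k j : Int) :
    pvCellAt p (pvCellAt p c k) j = pvCellAt p c (k + j) := by
  simp only [pvCellAt, Prod.mk.injEq]; constructor <;> ring

theorem pvShift_p (p c : Int × Int) : pvShift c p = pvCellAt p c 1 := by
  simp [pvShift, pvCellAt]

theorem pvShift_np (p c : Int × Int) : pvShift c (-p.1, -p.2) = pvCellAt p c (-1) := by
  simp only [pvShift, pvCellAt, Prod.mk.injEq]; constructor <;> ring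

theorem pvShift_shift_neg (t d : Int × Int) : pvShift (pvShift t d) (-d.1, -d.2) = t := by
  cases t; cases d; simp only [pvShift, Prod.mk.injEq]; constructor <;> ring

theorem pvShift_neg_shift (x d : Int × Int) : pvShift (pvShift x (-d.1, -d.2)) d = x := by
  cases x; cases d; simp only [pvShift, Prod.mk.injEq]; constructor <;> ring

theorem pvCellAt_inj (p c : Int × Int) (hps : p.1 * p.1 + p.2 * p.2 = 1) {j k : Int}
    (h : pvCellAt p c j = pvCellAt p c k) : j = k := by
  have h1 : c.1 + j * p.1 = c.1 + k * p.1 := congrArg Prod.fst h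
  have h2 : c.2 + j * p.2 = c.2 + k * p.2 := congrArg Prod.snd h
  have e1 : (j - k) * p.1 = 0 := by linear_combination h1
  have e2 : (j - k) * p.2 = 0 := by linear_combination h2
  have : j - k = 0 := by linear_combination p.1 * e1 + p.2 * e2 - (j - k) * hps
  omega

-- ---------- borders / tiles / layout characterizations ----------

theorem pvBordersAux_mem (island : List (Int × Int)) (t : Int × Int) (ds : List (Int × Int))
    (acc : PySem.Set (Int × Int × Int × Int)) (y : Int × Int × Int × Int) :
    y ∈ ds.foldl (fun borders d =>
        let xy := (t.1 + d.1, t.2 + d.2)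
        if xy ∈ island then borders
        else PySem.Set.add borders (xy.1, xy.2, d.1, d.2)) acc
    ↔ y ∈ acc ∨ ∃ dd ∈ ds, pvShift t dd ∉ island ∧
        y = ((pvShift t dd).1, (pvShift t dd).2, dd.1, dd.2) := by
  induction ds generalizing acc with
  | nil => simp
  | cons d ds ih =>
    simp only [List.foldl_cons]
    by_cases h : (t.1 + d.1, t.2 + d.2) ∈ island
    · rw [if_pos h, ih]
      constructor
      · rintro (ha | ⟨dd, hdd, hni, hy⟩)
        · exact Or.inl ha
        · exact Or.inr ⟨dd, List.mem_cons_of_mem _ hdd, hni, hy⟩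
      · rintro (ha | ⟨dd, hdd, hni, hy⟩)
        · exact Or.inl ha
        · rcases List.mem_cons.mp hdd with rfl | hdd
          · exact absurd h hni
          · exact Or.inr ⟨dd, hdd, hni, hy⟩
    · rw [if_neg h, ih]
      constructor
      · rintro (ha | ⟨dd, hdd, hni, hy⟩)
        · rcases (PySem.Set.mem_add _ _ _).mp ha with ha | rfl
          · exact Or.inl ha
          · exact Or.inr ⟨d, List.mem_cons_self, h, rfl⟩
        · exact Or.inr ⟨dd, List.mem_cons_of_mem _ hdd, hni, hy⟩
      · rintro (ha | ⟨dd, hdd, hni, hy⟩)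
        · exact Or.inl ((PySem.Set.mem_add _ _ _).mpr (Or.inl ha))
        · rcases List.mem_cons.mp hdd with rfl | hdd
          · subst hy; exact Or.inl ((PySem.Set.mem_add _ _ _).mpr (Or.inr rfl))
          · exact Or.inr ⟨dd, hdd, hni, hy⟩

theorem pvBorders_mem (island : List (Int × Int)) (y : Int × Int × Int × Int) :
    y ∈ pvFindIslandBorders island
    ↔ ∃ t ∈ island, ∃ dd ∈ pvDirs, pvShift t dd ∉ island ∧
        y = ((pvShift t dd).1, (pvShift t dd).2, dd.1, dd.2) := by
  have aux : ∀ (ts : List (Int × Int)) (acc : PySem.Set (Int × Int × Int × Int)),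
      y ∈ ts.foldl (fun borders tile =>
        pvDirs.foldl (fun borders d =>
          let xy := (tile.1 + d.1, tile.2 + d.2)
          if xy ∈ island then borders
          else PySem.Set.add borders (xy.1, xy.2, d.1, d.2)) borders) acc
      ↔ y ∈ acc ∨ ∃ t ∈ ts, ∃ dd ∈ pvDirs, pvShift t dd ∉ island ∧
          y = ((pvShift t dd).1, (pvShift t dd).2, dd.1, dd.2) := by
    intro ts
    induction ts with
    | nil => intro acc; simp
    | cons t ts ih =>
      intro acc
      simp only [List.foldl_cons]
      rw [ih, pvBordersAux_mem]
      constructor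
      · rintro ((ha | ⟨dd, hdd, hni, hy⟩) | ⟨t', ht', rest⟩)
        · exact Or.inl ha
        · exact Or.inr ⟨t, List.mem_cons_self, dd, hdd, hni, hy⟩
        · exact Or.inr ⟨t', List.mem_cons_of_mem _ ht', rest⟩
      · rintro (ha | ⟨t', ht', rest⟩)
        · exact Or.inl (Or.inl ha)
        · rcases List.mem_cons.mp ht' with rfl | ht'
          · exact Or.inl (Or.inr rest)
          · exact Or.inr ⟨t', ht', rest⟩
  unfold pvFindIslandBorders
  rw [aux]
  simp [PySem.Set.empty]

theorem pvBorders_nodup (island : List (Int × Int)) : (pvFindIslandBorders island).Nodup := by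
  have auxInner : ∀ (t : Int × Int) (ds : List (Int × Int)) (acc : PySem.Set (Int × Int × Int × Int)),
      acc.Nodup → (ds.foldl (fun borders d =>
        let xy := (t.1 + d.1, t.2 + d.2)
        if xy ∈ island then borders
        else PySem.Set.add borders (xy.1, xy.2, d.1, d.2)) acc).Nodup := by
    intro t ds
    induction ds with
    | nil => intro acc h; simpa using h
    | cons d ds ih =>
      intro acc h
      simp only [List.foldl_cons]
      by_cases hm : (t.1 + d.1, t.2 + d.2) ∈ island
      · rw [if_pos hm]; exact ih acc h
      · rw [if_neg hm]; exact ih _ (PySem.Set.nodup_add _ _ h)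
  have auxOuter : ∀ (ts : List (Int × Int)) (acc : PySem.Set (Int × Int × Int × Int)),
      acc.Nodup → (ts.foldl (fun borders tile =>
        pvDirs.foldl (fun borders d =>
          let xy := (tile.1 + d.1, tile.2 + d.2)
          if xy ∈ island then borders
          else PySem.Set.add borders (xy.1, xy.2, d.1, d.2)) borders) acc).Nodup := by
    intro ts
    induction ts with
    | nil => intro acc h; simpa using h
    | cons t ts ih =>
      intro acc h
      simp only [List.foldl_cons]
      exact ih _ (auxInner t pvDirs acc h)
  exact auxOuter island PySem.Set.empty (by simp [PySem.Set.empty])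

theorem pvTiles_mem (island : List (Int × Int)) (d : Int × Int) (hd : d ∈ pvDirs) (x : Int × Int) :
    x ∈ (pvFindIslandBorders island).filterMap (fun t =>
        if t.2.2.1 = d.1 ∧ t.2.2.2 = d.2 then some (t.1, t.2.1) else none)
    ↔ (x ∉ island ∧ pvShift x (-d.1, -d.2) ∈ island) := by
  rw [List.mem_filterMap]
  constructor
  · rintro ⟨b, hb, hfb⟩
    rcases (pvBorders_mem island b).mp hb with ⟨t, ht, dd, hdd, hni, rfl⟩
    by_cases hc : dd.1 = d.1 ∧ dd.2 = d.2
    · rw [if_pos hc] at hfb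
      have hdde : dd = d := Prod.ext hc.1 hc.2
      subst hdde
      have hx : x = pvShift t dd := by
        simpa [pvShift] using hfb.symm
      subst hx
      refine ⟨hni, ?_⟩
      rw [pvShift_shift_neg]; exact ht
    · rw [if_neg hc] at hfb; cases hfb
  · rintro ⟨hni, hmem⟩
    refine ⟨(x.1, x.2, d.1, d.2), ?_, by simp⟩
    rw [pvBorders_mem island]
    refine ⟨pvShift x (-d.1, -d.2), hmem, d, hd, ?_, ?_⟩
    · rw [pvShift_neg_shift]; exact hni
    · rw [pvShift_neg_shift]

theorem pvTiles_nodup (island : List (Int × Int)) (d : Int × Int) :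
    ((pvFindIslandBorders island).filterMap (fun t =>
        if t.2.2.1 = d.1 ∧ t.2.2.2 = d.2 then some (t.1, t.2.1) else none)).Nodup := by
  refine List.Nodup.filterMap ?_ (pvBorders_nodup island)
  intro a a' b hb hb'
  simp only [Option.mem_def] at hb hb'
  by_cases hc : a.2.2.1 = d.1 ∧ a.2.2.2 = d.2
  · rw [if_pos hc] at hb
    by_cases hc' : a'.2.2.1 = d.1 ∧ a'.2.2.2 = d.2
    · rw [if_pos hc'] at hb'
      have e1 : (a.1, a.2.1) = b := by injection hb
      have e2 : (a'.1, a'.2.1) = b := by injection hb'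
      have h1 : a.1 = b.1 := congrArg Prod.fst e1
      have h2 : a.2.1 = b.2 := congrArg Prod.snd e1
      have h1' : a'.1 = b.1 := congrArg Prod.fst e2
      have h2' : a'.2.1 = b.2 := congrArg Prod.snd e2
      have : a = (b.1, b.2, d.1, d.2) := by
        rcases a with ⟨x1, x2, x3, x4⟩
        simp only [Prod.mk.injEq]
        exact ⟨h1, h2, hc.1, hc.2⟩
      have that : a' = (b.1, b.2, d.1, d.2) := by
        rcases a' with ⟨x1, x2, x3, x4⟩
        simp only [Prod.mk.injEq]
        exact ⟨h1', h2', hc'.1, hc'.2⟩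
      rw [this, that]
    · rw [if_neg hc'] at hb'; cases hb'
  · rw [if_neg hc] at hb; cases hb


theorem pvLayout_getD (ts : List (Int × Int)) (dct : PySem.Dict (Int × Int) Int)
    (h : ∀ x, dct.getD x 0 = 0) :
    ∀ x, (ts.foldl (fun dct t => dct.insert t 0) dct).getD x 0 = 0 := by
  induction ts generalizing dct with
  | nil => simpa using h
  | cons t ts ih =>
    simp only [List.foldl_cons]
    refine ih _ ?_
    intro x
    rw [PySem.Dict.getD_insert]
    split <;> simp [h x]

theorem pvLayout_contains (ts : List (Int × Int)) (x : Int × Int) :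
    (ts.foldl (fun dct t => dct.insert t 0) (PySem.Dict.empty : PySem.Dict (Int × Int) Int)).contains x = true
    ↔ x ∈ ts := by
  rw [PySem.Dict.contains_iff_mem_keys,
    PySem.Dict.keys_foldl_insert (f := fun _ _ => (0 : Int))]
  simp only [PySem.Dict.keys_empty]
  rw [PySem.Set.update_nil_left]
  exact PySem.Set.mem_ofList _ _

theorem pvLayout_size (ts : List (Int × Int)) (hts : ts.Nodup) :
    (ts.foldl (fun dct t => dct.insert t 0) (PySem.Dict.empty : PySem.Dict (Int × Int) Int)).size
    = ts.length := by
  have hk : (ts.foldl (fun dct t => dct.insert t 0)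
      (PySem.Dict.empty : PySem.Dict (Int × Int) Int)).keys = ts := by
    rw [PySem.Dict.keys_foldl_insert (f := fun _ _ => (0 : Int))]
    simp only [PySem.Dict.keys_empty]
    rw [PySem.Set.update_nil_left]
    exact PySem.Set.ofList_eq_self_of_nodup _ hts
  have hlen : (ts.foldl (fun dct t => dct.insert t 0)
      (PySem.Dict.empty : PySem.Dict (Int × Int) Int)).keys.length = ts.length := by rw [hk]
  simpa [PySem.Dict.keys, PySem.Dict.size] using hlen

-- ---------- BFS characterization ----------

theorem pvBfsAux_zero (layout : PySem.Dict (Int × Int) Int) (E : PySem.Set (Int × Int))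
    (F : List (Int × Int)) : pvBfsAux layout 0 E F = E := rfl

theorem pvBfsAux_nil (layout : PySem.Dict (Int × Int) Int) (fuel : Nat)
    (E : PySem.Set (Int × Int)) : pvBfsAux layout (fuel + 1) E [] = E := rfl

theorem pvBfsAux_cons_mem (layout : PySem.Dict (Int × Int) Int) (fuel : Nat)
    (E : PySem.Set (Int × Int)) (t : Int × Int) (rest : List (Int × Int))
    (hct : PySem.Set.contains E t = true) :
    pvBfsAux layout (fuel + 1) E (t :: rest) = pvBfsAux layout fuel E rest := by
  rw [pvBfsAux, if_pos hct]

theorem pvBfsAux_cons_new (layout : PySem.Dict (Int × Int) Int) (fuel : Nat)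
    (E : PySem.Set (Int × Int)) (t : Int × Int) (rest : List (Int × Int))
    (hct : PySem.Set.contains E t = false) :
    pvBfsAux layout (fuel + 1) E (t :: rest) = pvBfsAux layout fuel (PySem.Set.add E t)
      (rest ++ pvDirs.filterMap (fun d =>
        let xy := (t.1 + d.1, t.2 + d.2)
        if layout.contains xy && !(PySem.Set.contains (PySem.Set.add E t) xy)
            && (layout.getD t 0 == layout.getD xy 0) then some xy else none)) := by
  rw [pvBfsAux, if_neg (by rw [hct]; simp)]

theorem pvApp_mem_of (layout : PySem.Dict (Int × Int) Int) (E' : PySem.Set (Int × Int))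
    (t y : Int × Int)
    (hy : y ∈ pvDirs.filterMap (fun d =>
      let xy := (t.1 + d.1, t.2 + d.2)
      if layout.contains xy && !(PySem.Set.contains E' xy)
          && (layout.getD t 0 == layout.getD xy 0) then some xy else none)) :
    ∃ dd ∈ pvDirs, y = pvShift t dd ∧ layout.contains y = true ∧ PySem.Set.contains E' y = false := by
  rcases List.mem_filterMap.mp hy with ⟨dd, hdd, hsome⟩
  by_cases hcond : (layout.contains (t.1 + dd.1, t.2 + dd.2)
      && !(PySem.Set.contains E' (t.1 + dd.1, t.2 + dd.2))
      && (layout.getD t 0 == layout.getD (t.1 + dd.1, t.2 + dd.2) 0)) = true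
  · rw [if_pos hcond] at hsome
    have hyeq : y = (t.1 + dd.1, t.2 + dd.2) := by injection hsome with h; exact h.symm
    subst hyeq
    simp only [Bool.and_eq_true, Bool.not_eq_true'] at hcond
    exact ⟨dd, hdd, rfl, hcond.1.1, hcond.1.2⟩
  · rw [if_neg hcond] at hsome; cases hsome

theorem pvApp_mem_intro (layout : PySem.Dict (Int × Int) Int)
    (H0 : ∀ x, layout.getD x 0 = 0) (E' : PySem.Set (Int × Int))
    (t : Int × Int) (dd : Int × Int) (hdd : dd ∈ pvDirs)
    (hcont : layout.contains (pvShift t dd) = true)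
    (hne : PySem.Set.contains E' (pvShift t dd) = false) :
    pvShift t dd ∈ pvDirs.filterMap (fun d =>
      let xy := (t.1 + d.1, t.2 + d.2)
      if layout.contains xy && !(PySem.Set.contains E' xy)
          && (layout.getD t 0 == layout.getD xy 0) then some xy else none) := by
  refine List.mem_filterMap.mpr ⟨dd, hdd, ?_⟩
  have hcond : (layout.contains (t.1 + dd.1, t.2 + dd.2)
      && !(PySem.Set.contains E' (t.1 + dd.1, t.2 + dd.2))
      && (layout.getD t 0 == layout.getD (t.1 + dd.1, t.2 + dd.2) 0)) = true := by
    have h1 : layout.contains (t.1 + dd.1, t.2 + dd.2) = true := hcont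
    have h2 : PySem.Set.contains E' (t.1 + dd.1, t.2 + dd.2) = false := hne
    rw [h1, h2, H0, H0]
    rfl
  rw [if_pos hcond]
  rfl

theorem pvApp_len (layout : PySem.Dict (Int × Int) Int) (E' : PySem.Set (Int × Int))
    (t : Int × Int) :
    (pvDirs.filterMap (fun d =>
      let xy := (t.1 + d.1, t.2 + d.2)
      if layout.contains xy && !(PySem.Set.contains E' xy)
          && (layout.getD t 0 == layout.getD xy 0) then some xy else none)).length ≤ 4 := by
  have := List.length_filterMap_le (fun d : Int × Int =>
      let xy := (t.1 + d.1, t.2 + d.2)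
      if layout.contains xy && !(PySem.Set.contains E' xy)
          && (layout.getD t 0 == layout.getD xy 0) then some xy else none) pvDirs
  simpa [pvDirs] using this

theorem pvM_lt (K : List (Int × Int)) (E : PySem.Set (Int × Int)) (t : Int × Int)
    (htK : t ∈ K) (htE : t ∉ E) : pvM K (PySem.Set.add E t) < pvM K E := by
  rw [PySem.Set.add_of_not_mem htE]
  unfold pvM
  have hts : (E ++ [t]).toFinset = insert t E.toFinset := by
    simp [List.toFinset_append]
  rw [hts]
  have hsd : K.toFinset \ insert t E.toFinset = (K.toFinset \ E.toFinset).erase t := by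
    ext x
    simp only [Finset.mem_sdiff, Finset.mem_insert, Finset.mem_erase, List.mem_toFinset]
    tauto
  rw [hsd]
  have hmem : t ∈ K.toFinset \ E.toFinset := by
    simp only [Finset.mem_sdiff, List.mem_toFinset]
    exact ⟨htK, htE⟩
  exact Finset.card_erase_lt_of_mem hmem

theorem pvBfsAux_sound (layout : PySem.Dict (Int × Int) Int) (K : List (Int × Int))
    (HK : ∀ x, layout.contains x = true ↔ x ∈ K)
    (C : Int × Int → Prop)
    (HC : ∀ y, C y → ∀ dd ∈ pvDirs, pvShift y dd ∈ K → C (pvShift y dd)) :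
    ∀ (fuel : Nat) (E : PySem.Set (Int × Int)) (F : List (Int × Int)),
      (∀ e ∈ E, C e) → (∀ t ∈ F, C t) → ∀ y ∈ pvBfsAux layout fuel E F, C y := by
  intro fuel
  induction fuel with
  | zero => intro E F hE hF y hy; exact hE y (by rwa [pvBfsAux_zero] at hy)
  | succ fuel ih =>
    intro E F hE hF y hy
    cases F with
    | nil => exact hE y (by rwa [pvBfsAux_nil] at hy)
    | cons t rest =>
      cases hct : PySem.Set.contains E t with
      | true =>
        rw [pvBfsAux_cons_mem layout fuel E t rest hct] at hy
        exact ih E rest hE (fun t' ht' => hF t' (List.mem_cons_of_mem _ ht')) y hy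
      | false =>
        rw [pvBfsAux_cons_new layout fuel E t rest hct] at hy
        refine ih _ _ ?_ ?_ y hy
        · intro e he
          rcases (PySem.Set.mem_add _ _ _).mp he with he | rfl
          · exact hE e he
          · exact hF e List.mem_cons_self
        · intro t' ht'
          rcases List.mem_append.mp ht' with ht' | ht'
          · exact hF t' (List.mem_cons_of_mem _ ht')
          · rcases pvApp_mem_of layout _ t t' ht' with ⟨dd, hdd, rfl, hcont, _⟩
            exact HC t (hF t List.mem_cons_self) dd hdd ((HK _).mp hcont)

theorem pvBfsAux_complete (layout : PySem.Dict (Int × Int) Int) (K : List (Int × Int))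
    (HK : ∀ x, layout.contains x = true ↔ x ∈ K) :
    ∀ (fuel : Nat) (E : PySem.Set (Int × Int)) (F : List (Int × Int)),
      (∀ t ∈ F, t ∈ K) → F.length + 4 * pvM K E ≤ fuel →
      ∀ y, (y ∈ E ∨ y ∈ F) → y ∈ pvBfsAux layout fuel E F := by
  intro fuel
  induction fuel with
  | zero =>
    intro E F hF hfuel y hy
    have hF0 : F = [] := List.length_eq_zero_iff.mp (by omega)
    subst hF0
    rw [pvBfsAux_zero]
    rcases hy with hy | hy
    · exact hy
    · cases hy
  | succ fuel ih =>
    intro E F hF hfuel y hy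
    cases F with
    | nil =>
      rw [pvBfsAux_nil]
      rcases hy with hy | hy
      · exact hy
      · cases hy
    | cons t rest =>
      cases hct : PySem.Set.contains E t with
      | true =>
        have htE : t ∈ E := (PySem.Set.contains_iff _ _).mp hct
        rw [pvBfsAux_cons_mem layout fuel E t rest hct]
        refine ih E rest (fun t' ht' => hF t' (List.mem_cons_of_mem _ ht')) (by
          simp only [List.length_cons] at hfuel; omega) y ?_
        rcases hy with hy | hy
        · exact Or.inl hy
        · rcases List.mem_cons.mp hy with rfl | hy
          · exact Or.inl htE
          · exact Or.inr hy
      | false =>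
        have htE : t ∉ E := fun h => by
          rw [(PySem.Set.contains_iff _ _).mpr h] at hct; cases hct
        have htK : t ∈ K := hF t List.mem_cons_self
        rw [pvBfsAux_cons_new layout fuel E t rest hct]
        have happ := pvApp_len layout (PySem.Set.add E t) t
        have hlt := pvM_lt K E t htK htE
        refine ih _ _ ?_ ?_ y ?_
        · intro t' ht'
          rcases List.mem_append.mp ht' with ht' | ht'
          · exact hF t' (List.mem_cons_of_mem _ ht')
          · rcases pvApp_mem_of layout _ t t' ht' with ⟨dd, hdd, rfl, hcont, _⟩
            exact (HK _).mp hcont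
        · rw [List.length_append]
          simp only [List.length_cons] at hfuel
          omega
        · rcases hy with hy | hy
          · exact Or.inl ((PySem.Set.mem_add _ _ _).mpr (Or.inl hy))
          · rcases List.mem_cons.mp hy with rfl | hy
            · exact Or.inl ((PySem.Set.mem_add _ _ _).mpr (Or.inr rfl))
            · exact Or.inr (List.mem_append.mpr (Or.inl hy))

theorem pvBfsAux_closed (layout : PySem.Dict (Int × Int) Int) (K : List (Int × Int))
    (HK : ∀ x, layout.contains x = true ↔ x ∈ K)
    (H0 : ∀ x, layout.getD x 0 = 0) :
    ∀ (fuel : Nat) (E : PySem.Set (Int × Int)) (F : List (Int × Int)),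
      (∀ t ∈ F, t ∈ K) → F.length + 4 * pvM K E ≤ fuel →
      (∀ e ∈ E, ∀ dd ∈ pvDirs, pvShift e dd ∈ K → (pvShift e dd ∈ E ∨ pvShift e dd ∈ F)) →
      ∀ y ∈ pvBfsAux layout fuel E F, ∀ dd ∈ pvDirs, pvShift y dd ∈ K →
        pvShift y dd ∈ pvBfsAux layout fuel E F := by
  intro fuel
  induction fuel with
  | zero =>
    intro E F hF hfuel Hcl y hy dd hdd hKn
    have hF0 : F = [] := List.length_eq_zero_iff.mp (by omega)
    subst hF0
    rw [pvBfsAux_zero] at hy ⊢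
    rcases Hcl y hy dd hdd hKn with h | h
    · exact h
    · cases h
  | succ fuel ih =>
    intro E F hF hfuel Hcl y hy dd hdd hKn
    cases F with
    | nil =>
      rw [pvBfsAux_nil] at hy ⊢
      rcases Hcl y hy dd hdd hKn with h | h
      · exact h
      · cases h
    | cons t rest =>
      cases hct : PySem.Set.contains E t with
      | true =>
        have htE : t ∈ E := (PySem.Set.contains_iff _ _).mp hct
        rw [pvBfsAux_cons_mem layout fuel E t rest hct] at hy ⊢
        refine ih E rest (fun t' ht' => hF t' (List.mem_cons_of_mem _ ht')) (by
          simp only [List.length_cons] at hfuel; omega) ?_ y hy dd hdd hKn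
        intro e he dd' hdd' hKn'
        rcases Hcl e he dd' hdd' hKn' with h | h
        · exact Or.inl h
        · rcases List.mem_cons.mp h with heq | h
          · rw [heq]; exact Or.inl htE
          · exact Or.inr h
      | false =>
        have htE : t ∉ E := fun h => by
          rw [(PySem.Set.contains_iff _ _).mpr h] at hct; cases hct
        have htK : t ∈ K := hF t List.mem_cons_self
        rw [pvBfsAux_cons_new layout fuel E t rest hct] at hy ⊢
        have happ := pvApp_len layout (PySem.Set.add E t) t
        have hlt := pvM_lt K E t htK htE
        refine ih _ _ ?_ ?_ ?_ y hy dd hdd hKn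
        · intro t' ht'
          rcases List.mem_append.mp ht' with ht' | ht'
          · exact hF t' (List.mem_cons_of_mem _ ht')
          · rcases pvApp_mem_of layout _ t t' ht' with ⟨dd', hdd', rfl, hcont, _⟩
            exact (HK _).mp hcont
        · rw [List.length_append]
          simp only [List.length_cons] at hfuel
          omega
        · intro e he dd' hdd' hKn'
          rcases (PySem.Set.mem_add _ _ _).mp he with he | rfl
          · rcases Hcl e he dd' hdd' hKn' with h | h
            · exact Or.inl ((PySem.Set.mem_add _ _ _).mpr (Or.inl h))
            · rcases List.mem_cons.mp h with heq | h
              · rw [heq]; exact Or.inl ((PySem.Set.mem_add _ _ _).mpr (Or.inr rfl))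
              · exact Or.inr (List.mem_append.mpr (Or.inl h))
          · by_cases hne : pvShift e dd' ∈ PySem.Set.add E e
            · exact Or.inl hne
            · refine Or.inr (List.mem_append.mpr (Or.inr ?_))
              refine pvApp_mem_intro layout H0 (PySem.Set.add E e) e dd' hdd'
                ((HK _).mpr hKn') ?_
              have h1 : PySem.Set.contains (PySem.Set.add E e) (pvShift e dd') ≠ true :=
                fun h => hne ((PySem.Set.contains_iff _ _).mp h)
              cases h : PySem.Set.contains (PySem.Set.add E e) (pvShift e dd')
              · rfl
              · exact absurd h h1

theorem pvBfs_char (layout : PySem.Dict (Int × Int) Int) (K : List (Int × Int))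
    (HK : ∀ x, layout.contains x = true ↔ x ∈ K)
    (H0 : ∀ x, layout.getD x 0 = 0)
    (hsz : K.toFinset.card ≤ layout.size)
    (d p : Int × Int) (hps : p.1 * p.1 + p.2 * p.2 = 1)
    (hpmem : p ∈ pvDirs) (hnpmem : (-p.1, -p.2) ∈ pvDirs)
    (hdirs : ∀ dd ∈ pvDirs, dd = d ∨ dd = p ∨ dd = (-d.1, -d.2) ∨ dd = (-p.1, -p.2))
    (hKd : ∀ c ∈ K, pvShift c d ∉ K ∧ pvShift c (-d.1, -d.2) ∉ K)
    (origin : Int × Int) (ho : origin ∈ K) (y : Int × Int) :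
    y ∈ pvBfs origin layout ↔ pvSame K p origin y := by
  have hfuel : (1 : ℕ) + 4 * pvM K PySem.Set.empty ≤ 4 * layout.size + 1 := by
    have hM : pvM K PySem.Set.empty = K.toFinset.card := by
      simp [pvM, PySem.Set.empty]
    omega
  have hForig : ∀ t ∈ [origin], t ∈ K := by
    intro t ht; rcases List.mem_singleton.mp ht with rfl; exact ho
  constructor
  · intro hy
    refine pvBfsAux_sound layout K HK (pvSame K p origin) ?_ _ PySem.Set.empty [origin]
      (fun e he => absurd he (by simp [PySem.Set.empty])) ?_ y hy
    · intro z hz dd hdd hKn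
      obtain ⟨k, rfl, hint⟩ := hz
      have hzK : pvCellAt p origin k ∈ K := hint k (by omega) (by omega)
      rcases hdirs dd hdd with rfl | rfl | rfl | rfl
      · exact absurd hKn ((hKd _ hzK).1)
      · refine ⟨k + 1, ?_, ?_⟩
        · rw [pvShift_p, pvCellAt_add]
        · intro j hj1 hj2
          by_cases hjk : min 0 k ≤ j ∧ j ≤ max 0 k
          · exact hint j hjk.1 hjk.2
          · have hj : j = k + 1 := by omega
            subst hj
            rwa [pvShift_p, pvCellAt_add] at hKn
      · exact absurd hKn ((hKd _ hzK).2)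
      · refine ⟨k + -1, ?_, ?_⟩
        · rw [pvShift_np, pvCellAt_add]
        · intro j hj1 hj2
          by_cases hjk : min 0 k ≤ j ∧ j ≤ max 0 k
          · exact hint j hjk.1 hjk.2
          · have hj : j = k + -1 := by omega
            subst hj
            rwa [pvShift_np, pvCellAt_add] at hKn
    · intro t ht
      rcases List.mem_singleton.mp ht with rfl
      exact ⟨0, (pvCellAt_zero p t).symm, fun j h1 h2 => by
        have hj : j = 0 := by omega
        subst hj; rw [pvCellAt_zero]; exact ho⟩
  · rintro ⟨k, rfl, hint⟩
    have hcl := pvBfsAux_closed layout K HK H0 (4 * layout.size + 1) PySem.Set.empty [origin]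
      hForig (by simpa using hfuel)
      (fun e he => absurd he (by simp [PySem.Set.empty]))
    have hc0 : origin ∈ pvBfs origin layout := by
      refine pvBfsAux_complete layout K HK _ _ _ hForig (by simpa using hfuel) origin
        (Or.inr (List.mem_singleton_self origin))
    have main : ∀ n : ℕ, ((n : Int) ≤ max 0 k) →
        pvCellAt p origin (n : Int) ∈ pvBfs origin layout := by
      intro n
      induction n with
      | zero => intro _; simpa [pvCellAt_zero] using hc0
      | succ n ihn =>
        intro hn
        have hn' : ((n : Int)) ≤ max 0 k := by push_cast at hn ⊢; omega
        have hprev := ihn hn'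
        have hKn : pvShift (pvCellAt p origin (n : Int)) p ∈ K := by
          rw [pvShift_p, pvCellAt_add]
          refine hint _ (by omega) (by push_cast at hn ⊢; omega)
        have hres := hcl _ hprev p hpmem hKn
        rw [pvShift_p, pvCellAt_add] at hres
        have hcast : ((n : Int) + 1) = ((n + 1 : ℕ) : Int) := by push_cast; ring
        rwa [hcast] at hres
    have mainNeg : ∀ n : ℕ, (min 0 k ≤ -(n : Int)) →
        pvCellAt p origin (-(n : Int)) ∈ pvBfs origin layout := by
      intro n
      induction n with
      | zero => intro _; simpa [pvCellAt_zero] using hc0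
      | succ n ihn =>
        intro hn
        have hn' : min 0 k ≤ -((n : Int)) := by push_cast at hn ⊢; omega
        have hprev := ihn hn'
        have hKn : pvShift (pvCellAt p origin (-(n : Int))) (-p.1, -p.2) ∈ K := by
          rw [pvShift_np, pvCellAt_add]
          refine hint _ (by push_cast at hn ⊢; omega) (by omega)
        have hres := hcl _ hprev (-p.1, -p.2) hnpmem hKn
        rw [pvShift_np, pvCellAt_add] at hres
        have hcast : (-(n : Int) + -1) = -((n + 1 : ℕ) : Int) := by push_cast; ring
        rwa [hcast] at hres
    rcases (by omega : 0 ≤ k ∨ k < 0) with hk | hk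
    · have := main k.toNat (by rw [Int.toNat_of_nonneg hk]; omega)
      rwa [Int.toNat_of_nonneg hk] at this
    · have := mainNeg (-k).toNat (by rw [Int.toNat_of_nonneg (by omega)]; omega)
      rw [Int.toNat_of_nonneg (by omega), neg_neg] at this
      exact this

-- ---------- runs: existence of an exit, pvN / pvEnd facts ----------

theorem pvRunBound (K : List (Int × Int)) (p : Int × Int) (hps : p.1 * p.1 + p.2 * p.2 = 1)
    (c : Int × Int) (m : ℕ) (h : ∀ j : ℕ, j < m → pvCellAt p c ((j : Int) + 1) ∈ K) :
    m ≤ K.length := by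
  have hinj : Function.Injective (fun n : ℕ => pvCellAt p c ((n : Int) + 1)) := by
    intro a b hab
    have := pvCellAt_inj p c hps hab
    omega
  have hsub : (Finset.range m).image (fun n : ℕ => pvCellAt p c ((n : Int) + 1)) ⊆ K.toFinset := by
    intro x hx
    rcases Finset.mem_image.mp hx with ⟨n, hn, rfl⟩
    exact List.mem_toFinset.mpr (h n (Finset.mem_range.mp hn))
  have h1 := Finset.card_le_card hsub
  rw [Finset.card_image_of_injective _ hinj, Finset.card_range] at h1
  exact h1.trans (List.toFinset_card_le K)

theorem pvExit (K : List (Int × Int)) (p : Int × Int) (hps : p.1 * p.1 + p.2 * p.2 = 1)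
    (c : Int × Int) : ∃ n : ℕ, n < K.length + 1 ∧ pvCellAt p c ((n : Int) + 1) ∉ K := by
  by_contra h
  have h' : ∀ j : ℕ, j < K.length + 1 → pvCellAt p c ((j : Int) + 1) ∈ K := by
    intro j hj
    by_contra hm
    exact h ⟨j, hj, hm⟩
  have : K.length + 1 ≤ K.length :=
    pvRunBound K p hps c (K.length + 1) (fun j hj => h' j hj)
  omega

theorem pvN_lt_mem (K : List (Int × Int)) (p c : Int × Int) :
    ∀ m : ℕ, m < pvN K p c → pvCellAt p c ((m : Int) + 1) ∈ K := by
  intro m hm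
  by_cases h : ∃ n : ℕ, n < K.length + 1 ∧ pvCellAt p c ((n : Int) + 1) ∉ K
  · rw [pvN, dif_pos h] at hm
    have hmin := Nat.find_min h hm
    have hspec := Nat.find_spec h
    by_contra hmm
    exact hmin ⟨by omega, hmm⟩
  · rw [pvN, dif_neg h] at hm
    omega

theorem pvN_mem (K : List (Int × Int)) (p c : Int × Int) (hc : c ∈ K) :
    ∀ j : ℕ, j ≤ pvN K p c → pvCellAt p c (j : Int) ∈ K := by
  intro j hj
  cases j with
  | zero => simpa [pvCellAt_zero] using hc
  | succ m =>
    have := pvN_lt_mem K p c m (by omega)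
    have hcast : ((m : Int) + 1) = ((m + 1 : ℕ) : Int) := by push_cast; ring
    rwa [hcast] at this

theorem pvN_exit (K : List (Int × Int)) (p : Int × Int) (hps : p.1 * p.1 + p.2 * p.2 = 1)
    (c : Int × Int) : pvCellAt p c ((pvN K p c : Int) + 1) ∉ K := by
  rw [pvN, dif_pos (pvExit K p hps c)]
  exact (Nat.find_spec (pvExit K p hps c)).2

theorem pvSame_end (K : List (Int × Int)) (p c : Int × Int) (hc : c ∈ K) :
    pvSame K p c (pvEnd K p c) := by
  refine ⟨(pvN K p c : Int), rfl, ?_⟩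
  intro j h1 h2
  have h0 : (0 : Int) ≤ j := by omega
  have := pvN_mem K p c hc j.toNat (by omega)
  rwa [Int.toNat_of_nonneg h0] at this

theorem pvSame_symm (K : List (Int × Int)) (p : Int × Int)
    (_hps : p.1 * p.1 + p.2 * p.2 = 1) {c y : Int × Int} (h : pvSame K p c y) : pvSame K p y c := by
  obtain ⟨k, rfl, hint⟩ := h
  refine ⟨-k, ?_, ?_⟩
  · rw [pvCellAt_add]
    have : k + -k = 0 := by ring
    rw [this, pvCellAt_zero]
  · intro j hj1 hj2
    rw [pvCellAt_add]
    exact hint (k + j) (by omega) (by omega)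

theorem pvSame_trans (K : List (Int × Int)) (p : Int × Int) {c y z : Int × Int}
    (h1 : pvSame K p c y) (h2 : pvSame K p y z) : pvSame K p c z := by
  obtain ⟨k1, rfl, hint1⟩ := h1
  obtain ⟨k2, rfl, hint2⟩ := h2
  rw [pvCellAt_add]
  refine ⟨k1 + k2, rfl, ?_⟩
  intro j hj1 hj2
  by_cases hjk : min 0 k1 ≤ j ∧ j ≤ max 0 k1
  · exact hint1 j hjk.1 hjk.2
  · have := hint2 (j - k1) (by omega) (by omega)
    rw [pvCellAt_add] at this
    have he : k1 + (j - k1) = j := by ring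
    rwa [he] at this

theorem pvEnd_eq_of_same (K : List (Int × Int)) (p : Int × Int)
    (hps : p.1 * p.1 + p.2 * p.2 = 1) {c y : Int × Int} (h : pvSame K p c y) :
    pvEnd K p y = pvEnd K p c := by
  obtain ⟨k, rfl, hint⟩ := h
  have hcK : c ∈ K := by
    have := hint 0 (by omega) (by omega)
    rwa [pvCellAt_zero] at this
  have hkN : k ≤ (pvN K p c : Int) := by
    by_contra hgt
    rw [not_le] at hgt
    exact pvN_exit K p hps c (hint ((pvN K p c : Int) + 1) (by omega) (by omega))
  have hmid : ∀ i : Int, k ≤ i → i ≤ (pvN K p c : Int) → pvCellAt p c i ∈ K := by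
    intro i hi1 hi2
    by_cases hi0 : 0 ≤ i
    · have := pvN_mem K p c hcK i.toNat (by omega)
      rwa [Int.toNat_of_nonneg hi0] at this
    · exact hint i (by omega) (by omega)
  have hNy : (pvN K p (pvCellAt p c k) : Int) = (pvN K p c : Int) - k := by
    have hexit_y : pvCellAt p (pvCellAt p c k) (((pvN K p c : Int) - k) + 1) ∉ K := by
      rw [pvCellAt_add]
      have he : k + ((pvN K p c : Int) - k + 1) = (pvN K p c : Int) + 1 := by ring
      rw [he]
      exact pvN_exit K p hps c
    have hbnd : ((pvN K p c : Int) - k).toNat ≤ K.length := by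
      refine pvRunBound K p hps (pvCellAt p c k) _ ?_
      intro j hj
      rw [pvCellAt_add]
      exact hmid (k + ((j : Int) + 1)) (by omega) (by omega)
    have hle : pvN K p (pvCellAt p c k) ≤ ((pvN K p c : Int) - k).toNat := by
      rw [pvN, dif_pos (pvExit K p hps (pvCellAt p c k))]
      refine Nat.find_min' _ ⟨by omega, ?_⟩
      have hcast : ((((pvN K p c : Int) - k).toNat : Int) + 1) = ((pvN K p c : Int) - k) + 1 := by
        omega
      rw [hcast]
      exact hexit_y
    have hge : ¬ (pvN K p (pvCellAt p c k) < ((pvN K p c : Int) - k).toNat) := by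
      intro hlt
      have hexit := pvN_exit K p hps (pvCellAt p c k)
      rw [pvCellAt_add] at hexit
      exact hexit (hmid (k + ((pvN K p (pvCellAt p c k) : Int) + 1)) (by omega) (by omega))
    omega
  show pvCellAt p (pvCellAt p c k) (pvN K p (pvCellAt p c k) : Int) = pvEnd K p c
  rw [pvCellAt_add, hNy]
  have he : k + ((pvN K p c : Int) - k) = (pvN K p c : Int) := by ring
  rw [he]
  rfl

theorem pvSame_iff_end (K : List (Int × Int)) (p : Int × Int)
    (hps : p.1 * p.1 + p.2 * p.2 = 1) (c : Int × Int) (hc : c ∈ K) (y : Int × Int) :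
    pvSame K p c y ↔ (y ∈ K ∧ pvEnd K p y = pvEnd K p c) := by
  constructor
  · intro h
    refine ⟨?_, pvEnd_eq_of_same K p hps h⟩
    obtain ⟨k, rfl, hint⟩ := h
    exact hint k (by omega) (by omega)
  · rintro ⟨hy, he⟩
    have h1 := pvSame_end K p c hc
    have h2 := pvSame_end K p y hy
    rw [he] at h2
    exact pvSame_trans K p h1 (pvSame_symm K p hps h2)

-- ---------- the side-collecting loop counts distinct run ends ----------

theorem pvLoop_count (layout : PySem.Dict (Int × Int) Int) (K : List (Int × Int)) (p : Int × Int)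
    (hps : p.1 * p.1 + p.2 * p.2 = 1)
    (hbfs : ∀ origin ∈ K, ∀ y, y ∈ pvBfs origin layout ↔ pvSame K p origin y) :
    ∀ (ts : List (Int × Int)), (∀ t ∈ ts, t ∈ K) →
    ∀ (s0 : List (PySem.Set (Int × Int))) (forb : PySem.Set (Int × Int)) (Eds : Finset (Int × Int)),
      (∀ y, y ∈ forb ↔ (y ∈ K ∧ pvEnd K p y ∈ Eds)) →
      ((ts.foldl (fun (st : List (PySem.Set (Int × Int)) × PySem.Set (Int × Int)) xy =>
          if xy ∈ st.2 then st
          else (st.1 ++ [pvBfs xy layout], PySem.Set.update st.2 (pvBfs xy layout)))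
        (s0, forb)).1).length
      = s0.length + ((ts.toFinset.image (pvEnd K p)) \ Eds).card := by
  intro ts
  induction ts with
  | nil => intro _ s0 forb Eds _; simp
  | cons c ts ih =>
    intro hts s0 forb Eds hforb
    have hcK : c ∈ K := hts c List.mem_cons_self
    have hts' : ∀ t ∈ ts, t ∈ K := fun t ht => hts t (List.mem_cons_of_mem _ ht)
    simp only [List.foldl_cons]
    by_cases hcf : c ∈ forb
    · rw [if_pos hcf]
      have hE : pvEnd K p c ∈ Eds := ((hforb c).mp hcf).2
      rw [ih hts' s0 forb Eds hforb]
      have hset : ((c :: ts).toFinset.image (pvEnd K p)) \ Eds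
          = ((ts.toFinset.image (pvEnd K p)) \ Eds) := by
        rw [List.toFinset_cons, Finset.image_insert, Finset.insert_sdiff_of_mem _ hE]
      rw [hset]
    · rw [if_neg hcf]
      have hEe : pvEnd K p c ∉ Eds := fun hE => hcf ((hforb c).mpr ⟨hcK, hE⟩)
      have hforb' : ∀ y, y ∈ PySem.Set.update forb (pvBfs c layout)
          ↔ (y ∈ K ∧ pvEnd K p y ∈ insert (pvEnd K p c) Eds) := by
        intro y
        rw [PySem.Set.mem_update]
        constructor
        · rintro (hy | hy)
          · rcases (hforb y).mp hy with ⟨h1, h2⟩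
            exact ⟨h1, Finset.mem_insert_of_mem h2⟩
          · have hsame := (hbfs c hcK y).mp hy
            rcases (pvSame_iff_end K p hps c hcK y).mp hsame with ⟨h1, h2⟩
            exact ⟨h1, by rw [h2]; exact Finset.mem_insert_self _ _⟩
        · rintro ⟨h1, h2⟩
          rcases Finset.mem_insert.mp h2 with h2 | h2
          · exact Or.inr ((hbfs c hcK y).mpr ((pvSame_iff_end K p hps c hcK y).mpr ⟨h1, h2⟩))
          · exact Or.inl ((hforb y).mpr ⟨h1, h2⟩)
      rw [ih hts' (s0 ++ [pvBfs c layout]) _ (insert (pvEnd K p c) Eds) hforb']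
      rw [List.length_append, List.length_singleton]
      have hset : ((c :: ts).toFinset.image (pvEnd K p)) \ Eds
          = insert (pvEnd K p c) ((ts.toFinset.image (pvEnd K p)) \ insert (pvEnd K p c) Eds) := by
        ext x
        simp only [List.toFinset_cons, Finset.image_insert, Finset.mem_sdiff, Finset.mem_insert]
        constructor
        · rintro ⟨h1 | h1, h2⟩
          · exact Or.inl h1
          · by_cases hxe : x = pvEnd K p c
            · exact Or.inl hxe
            · exact Or.inr ⟨h1, fun hin => by
                rcases hin with hx | hx
                · exact hxe hx
                · exact h2 hx⟩
        · rintro (h1 | ⟨h1, h2⟩)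
          · subst h1; exact ⟨Or.inl rfl, hEe⟩
          · exact ⟨Or.inr h1, fun hin => h2 (Or.inr hin)⟩
      rw [hset, Finset.card_insert_of_notMem (by simp)]
      omega

-- ---------- per-direction count ----------

def pvTilesOf (island : List (Int × Int)) (d : Int × Int) : List (Int × Int) :=
  (pvFindIslandBorders island).filterMap (fun t =>
    if t.2.2.1 = d.1 ∧ t.2.2.2 = d.2 then some (t.1, t.2.1) else none)

def pvLayoutOf (island : List (Int × Int)) (d : Int × Int) : PySem.Dict (Int × Int) Int :=
  (pvTilesOf island d).foldl (fun dct t => dct.insert t 0) PySem.Dict.empty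

theorem pvShift_comm (c a b : Int × Int) : pvShift (pvShift c a) b = pvShift (pvShift c b) a := by
  cases c; cases a; cases b; simp only [pvShift, Prod.mk.injEq]; constructor <;> ring

theorem pvShift_inj (d : Int × Int) : Function.Injective (fun c => pvShift c d) := by
  intro a b hab
  have h1 : a.1 + d.1 = b.1 + d.1 := congrArg Prod.fst hab
  have h2 : a.2 + d.2 = b.2 + d.2 := congrArg Prod.snd hab
  exact Prod.ext (by omega) (by omega)

theorem pvPerDir (island : List (Int × Int)) (d : Int × Int) (hd : d ∈ pvDirs)
    (sides0 : List (PySem.Set (Int × Int))) :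
    (((pvTilesOf island d).foldl
        (fun (st : List (PySem.Set (Int × Int)) × PySem.Set (Int × Int)) xy =>
          if xy ∈ st.2 then st
          else (st.1 ++ [pvBfs xy (pvLayoutOf island d)],
            PySem.Set.update st.2 (pvBfs xy (pvLayoutOf island d))))
        (sides0, PySem.Set.empty)).1).length
    = sides0.length + (island.toFinset.filter (fun c => pvBpB island d c = true)).card := by
  have hps : ((-d.2, d.1) : Int × Int).1 * (-d.2, d.1).1 + ((-d.2, d.1) : Int × Int).2 * (-d.2, d.1).2 = 1 := by
    fin_cases hd <;> norm_num
  have hpmem : ((-d.2, d.1) : Int × Int) ∈ pvDirs := by fin_cases hd <;> decide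
  have hnpmem : ((-(-d.2 : Int), -d.1) : Int × Int) ∈ pvDirs := by fin_cases hd <;> decide
  have hdirs : ∀ dd ∈ pvDirs, dd = d ∨ dd = ((-d.2, d.1) : Int × Int)
      ∨ dd = ((-d.1, -d.2) : Int × Int) ∨ dd = ((-(-d.2 : Int), -d.1) : Int × Int) := by
    fin_cases hd <;> decide
  set K := pvTilesOf island d with hK
  set p : Int × Int := (-d.2, d.1) with hp
  have hKmem : ∀ x, x ∈ K ↔ (x ∉ island ∧ pvShift x (-d.1, -d.2) ∈ island) :=
    fun x => pvTiles_mem island d hd x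
  have hKnd : K.Nodup := pvTiles_nodup island d
  have HK : ∀ x, (pvLayoutOf island d).contains x = true ↔ x ∈ K :=
    fun x => pvLayout_contains K x
  have H0 : ∀ x, (pvLayoutOf island d).getD x 0 = 0 :=
    pvLayout_getD K PySem.Dict.empty (fun x => by simp [PySem.Dict.getD_empty])
  have hsz : K.toFinset.card ≤ (pvLayoutOf island d).size := by
    rw [show (pvLayoutOf island d).size = K.length from pvLayout_size K hKnd]
    exact List.toFinset_card_le K
  have hKd : ∀ c ∈ K, pvShift c d ∉ K ∧ pvShift c (-d.1, -d.2) ∉ K := by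
    intro c hc
    rcases (hKmem c).mp hc with ⟨hc1, hc2⟩
    constructor
    · intro hmem
      rcases (hKmem _).mp hmem with ⟨_, h2⟩
      rw [pvShift_shift_neg] at h2
      exact hc1 h2
    · intro hmem
      rcases (hKmem _).mp hmem with ⟨h1, _⟩
      exact h1 hc2
  have hnp : ((-p.1, -p.2) : Int × Int) = ((-(-d.2 : Int), -d.1) : Int × Int) := by rw [hp]
  have hbfs : ∀ origin ∈ K, ∀ y, y ∈ pvBfs origin (pvLayoutOf island d) ↔ pvSame K p origin y := by
    intro o ho y
    exact pvBfs_char (pvLayoutOf island d) K HK H0 hsz d p hps hpmem (hnp ▸ hnpmem) hdirs hKd o ho y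
  have hcount := pvLoop_count (pvLayoutOf island d) K p hps hbfs K (fun t ht => ht)
    sides0 PySem.Set.empty ∅ (by intro y; simp [PySem.Set.empty])
  rw [hcount, Finset.sdiff_empty]
  congr 1
  -- image of pvEnd over K = the run ends of K = shifted B-predicate cells
  have hend_filter : K.toFinset.image (pvEnd K p) = K.toFinset.filter (fun x => pvShift x p ∉ K) := by
    ext x
    simp only [Finset.mem_image, Finset.mem_filter, List.mem_toFinset]
    constructor
    · rintro ⟨c, hc, rfl⟩
      refine ⟨?_, ?_⟩
      · have := pvN_mem K p c hc (pvN K p c) (le_refl _)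
        exact this
      · rw [pvShift_p, pvEnd, pvCellAt_add]
        exact pvN_exit K p hps c
    · rintro ⟨hx, hnx⟩
      have hN0 : pvN K p x = 0 := by
        rw [pvN, dif_pos (pvExit K p hps x)]
        rw [Nat.find_eq_zero]
        refine ⟨by omega, ?_⟩
        rw [show ((0 : ℕ) : Int) + 1 = 1 by norm_num, ← pvShift_p]
        exact hnx
      refine ⟨x, hx, ?_⟩
      rw [pvEnd, hN0]
      exact pvCellAt_zero p x
  rw [hend_filter]
  -- bijection c ↦ c + d between counted island cells and run ends
  have himg : (island.toFinset.filter (fun c => pvBpB island d c = true)).image (fun c => pvShift c d)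
      = K.toFinset.filter (fun x => pvShift x p ∉ K) := by
    ext x
    simp only [Finset.mem_image, Finset.mem_filter, List.mem_toFinset]
    constructor
    · rintro ⟨c, ⟨hc, hbp⟩, rfl⟩
      simp only [pvBpB, Bool.and_eq_true, Bool.or_eq_true, decide_eq_true_eq] at hbp
      obtain ⟨hb1, hb2⟩ := hbp
      refine ⟨(hKmem _).mpr ⟨hb1, by rw [pvShift_shift_neg]; exact hc⟩, ?_⟩
      intro hmem
      rcases (hKmem _).mp hmem with ⟨h1, h2⟩
      rw [pvShift_comm c d p, pvShift_shift_neg] at h2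
      rw [pvShift_comm c d p] at h1
      rcases hb2 with hb2 | hb2
      · exact hb2 h2
      · exact h1 hb2
    · rintro ⟨hx, hnx⟩
      rcases (hKmem x).mp hx with ⟨h1, h2⟩
      refine ⟨pvShift x (-d.1, -d.2), ⟨h2, ?_⟩, pvShift_neg_shift x d⟩
      simp only [pvBpB, Bool.and_eq_true, Bool.or_eq_true, decide_eq_true_eq]
      rw [pvShift_neg_shift]
      have e1 : pvShift (pvShift x (-d.1, -d.2)) p = pvShift (pvShift x p) (-d.1, -d.2) :=
        pvShift_comm x (-d.1, -d.2) p
      have e2 : pvShift (pvShift (pvShift x (-d.1, -d.2)) p) d = pvShift x p := by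
        rw [e1, pvShift_neg_shift]
      refine ⟨h1, ?_⟩
      by_cases hc : pvShift x p ∈ island
      · right; rw [e2]; exact hc
      · left
        rw [e1]
        intro hmem
        exact hnx ((hKmem _).mpr ⟨hc, hmem⟩)
  rw [← himg, Finset.card_image_of_injective _ (pvShift_inj d)]

-- ---------- assembling both sides ----------

theorem pvA_eq (island : List (Int × Int)) :
    calc_island_sides island
    = ((pvDirs.map (fun d => (island.toFinset.filter (fun c => pvBpB island d c = true)).card)).sum : Int) := by
  have key : ∀ (ds : List (Int × Int)), (∀ x ∈ ds, x ∈ pvDirs) →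
      ∀ s0 : List (PySem.Set (Int × Int)),
      (ds.foldl (fun sides dd =>
        ((pvTilesOf island dd).foldl
          (fun (st : List (PySem.Set (Int × Int)) × PySem.Set (Int × Int)) xy =>
            if xy ∈ st.2 then st
            else (st.1 ++ [pvBfs xy (pvLayoutOf island dd)],
              PySem.Set.update st.2 (pvBfs xy (pvLayoutOf island dd))))
          (sides, PySem.Set.empty)).1) s0).length
      = s0.length + (ds.map (fun d =>
          (island.toFinset.filter (fun c => pvBpB island d c = true)).card)).sum := by
    intro ds
    induction ds with
    | nil => intro _ s0; simp
    | cons dd ds ih =>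
      intro hmem s0
      simp only [List.foldl_cons, List.map_cons, List.sum_cons]
      rw [ih (fun x hx => hmem x (List.mem_cons_of_mem _ hx))]
      rw [pvPerDir island dd (hmem dd List.mem_cons_self) s0]
      omega
  have h := key pvDirs (fun x hx => hx) []
  show (((pvDirs.foldl (fun sides dd =>
        ((pvTilesOf island dd).foldl
          (fun (st : List (PySem.Set (Int × Int)) × PySem.Set (Int × Int)) xy =>
            if xy ∈ st.2 then st
            else (st.1 ++ [pvBfs xy (pvLayoutOf island dd)],
              PySem.Set.update st.2 (pvBfs xy (pvLayoutOf island dd))))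
          (sides, PySem.Set.empty)).1) []).length : ℕ) : Int) = _
  rw [h]
  norm_num

theorem pvB_eq (island : List (Int × Int)) :
    calc_island_sides_alt island
    = ((pvDirs.map (fun d => (island.toFinset.filter (fun c => pvBpB island d c = true)).card)).sum : Int) := by
  have hLnd : (PySem.Set.ofList island).Nodup := PySem.Set.nodup_ofList island
  have hstep : ∀ (c : Int × Int) (tot : Int) (dd : Int × Int),
      (if (c.1 + dd.1, c.2 + dd.2) ∈ island then tot
       else if (c.1 + -dd.2, c.2 + dd.1) ∉ island ∨
           (c.1 + -dd.2 + dd.1, c.2 + dd.1 + dd.2) ∈ island then tot + 1 else tot)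
      = tot + (if pvBpB island dd c = true then (1 : ℤ) else 0) := by
    intro c tot dd
    by_cases h1 : (c.1 + dd.1, c.2 + dd.2) ∈ island
    · rw [if_pos h1]
      have hb : pvBpB island dd c = false := by
        simp only [pvBpB, Bool.and_eq_false_iff]
        left
        simpa [pvShift] using h1
      rw [hb]; simp
    · rw [if_neg h1]
      by_cases h2 : (c.1 + -dd.2, c.2 + dd.1) ∉ island ∨
          (c.1 + -dd.2 + dd.1, c.2 + dd.1 + dd.2) ∈ island
      · rw [if_pos h2]
        have hb : pvBpB island dd c = true := by
          simp only [pvBpB, Bool.and_eq_true, Bool.or_eq_true, decide_eq_true_eq]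
          exact ⟨h1, h2⟩
        rw [hb]; simp
      · rw [if_neg h2]
        rw [not_or, not_not] at h2
        have hb : pvBpB island dd c = false := by
          simp only [pvBpB, Bool.and_eq_false_iff]
          right
          simp only [Bool.or_eq_false_iff, decide_eq_false_iff_not, not_not]
          exact ⟨h2.1, h2.2⟩
        rw [hb]; simp
  have hcell : ∀ (tot : Int) (c : Int × Int),
      ([((1 : Int), (0 : Int)), (0, 1), (-1, 0), (0, -1)]).foldl (fun total dd =>
        if (c.1 + dd.1, c.2 + dd.2) ∈ island then total
        else
          if (c.1 + -dd.2, c.2 + dd.1) ∉ island ∨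
              (c.1 + -dd.2 + dd.1, c.2 + dd.1 + dd.2) ∈ island then total + 1
          else total) tot
      = tot + (([((1 : Int), (0 : Int)), (0, 1), (-1, 0), (0, -1)]).map (fun dd =>
          if pvBpB island dd c = true then (1 : ℤ) else 0)).sum := by
    intro tot c
    simp only [List.foldl_cons, List.foldl_nil, hstep c, List.map_cons, List.map_nil,
      List.sum_cons, List.sum_nil]
    ring
  have houter : calc_island_sides_alt island
      = 0 + ((PySem.Set.ofList island).map (fun c =>
          (([((1 : Int), (0 : Int)), (0, 1), (-1, 0), (0, -1)]).map (fun dd =>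
            if pvBpB island dd c = true then (1 : ℤ) else 0)).sum)).sum := by
    unfold calc_island_sides_alt
    rw [PySem.List.foldl_congr_mem _ _ (fun tot c =>
        tot + (([((1 : Int), (0 : Int)), (0, 1), (-1, 0), (0, -1)]).map (fun dd =>
          if pvBpB island dd c = true then (1 : ℤ) else 0)).sum) _
      (fun acc x _ => hcell acc x)]
    rw [PySem.List.foldl_add]
  have hdir : ∀ dd : Int × Int,
      ((PySem.Set.ofList island).map (fun c =>
        if pvBpB island dd c = true then (1 : ℤ) else 0)).sum
      = ((island.toFinset.filter (fun c => pvBpB island dd c = true)).card : ℤ) := by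
    intro dd
    rw [PySem.List.sum_map_ite_one_zero]
    congr 1
    rw [List.countP_eq_length_filter]
    have hnd2 : ((PySem.Set.ofList island).filter (pvBpB island dd)).Nodup := hLnd.filter _
    rw [← List.toFinset_card_of_nodup hnd2, List.toFinset_filter]
    congr 2
    ext x
    simp [PySem.Set.mem_ofList]
  rw [houter]
  simp only [List.map_cons, List.map_nil, List.sum_cons, List.sum_nil, add_zero]
  rw [PySem.List.sum_map_add_int, PySem.List.sum_map_add_int, PySem.List.sum_map_add_int]
  rw [hdir, hdir, hdir, hdir]
  simp only [pvDirs, List.map_cons, List.map_nil, List.sum_cons, List.sum_nil]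
  push_cast
  ring

theorem pv_main (island : List (Int × Int)) :
    calc_island_sides island = calc_island_sides_alt island := by
  rw [pvA_eq, pvB_eq]

-- ===== VERDICT (by name: the statement is the Claim_ definition above) =====
theorem calc_island_sides_spec : Claim_equal_calc_island_sides := by
  intro island _
  unfold Spec_calc_island_sides
  exact pv_main island
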